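-- pv_equiv track=rewrite | github.com/kagami-official/kagami_leetcode | problem_1493.py | get_ones_index
-- ===== SOURCE A (Python) =====
-- from typing import List
--
-- def get_ones_index(nums: List[int]) -> int:
--     flag = 0
--     index1 = 0
--     index2 = 0
--     ones_list = []
--     for i in range(len(nums)):
--         if (flag == 0) & (nums[i]==1):
--             index1 = i
--             index2 = i
--             flag = 1
--         if (flag == 1) & (nums[i]==1):
--             index2 = i
--             if (i+1==len(nums)):
--                 ones_list.append([index1,index2])
--                 flag = 0
--             elif (i+1<len(nums)) & (nums[i+1]==0):
--                 ones_list.append([index1,index2])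
--                 flag = 0
--         i = i + 1
--     return ones_list
-- ===== SOURCE B (Python) =====
-- from typing import List
--
-- def get_ones_index(nums: List[int]) -> int:
--     ones = [i for i, x in enumerate(nums) if x == 1]
--     res = []
--     start = None
--     for i in ones:
--         if start is None:
--             start = i
--         if i + 1 == len(nums) or nums[i + 1] == 0:
--             res.append([start, i])
--             start = None
--     return res
-- ===== Notes on version B (the rewrite author's own statement) =====
-- stated objective: idiomatic
-- what changed: B first collects the indices of the 1-entries with an enumerate-based comprehension and then scans only those indices with an Option run-start, instead of A's flag/index1/index2 state machine that tests every position twice with bitwise-& conditions.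
import Mathlib
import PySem

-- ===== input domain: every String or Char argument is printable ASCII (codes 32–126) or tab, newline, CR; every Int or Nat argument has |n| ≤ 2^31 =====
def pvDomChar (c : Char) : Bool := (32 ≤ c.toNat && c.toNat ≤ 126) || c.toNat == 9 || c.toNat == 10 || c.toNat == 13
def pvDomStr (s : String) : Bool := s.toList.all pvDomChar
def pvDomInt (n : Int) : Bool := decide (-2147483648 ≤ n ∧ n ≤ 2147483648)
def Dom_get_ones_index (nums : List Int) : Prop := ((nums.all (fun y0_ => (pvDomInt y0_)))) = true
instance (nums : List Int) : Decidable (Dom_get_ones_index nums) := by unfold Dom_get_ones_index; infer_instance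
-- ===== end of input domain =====

-- B replaces A's flag/index1/index2 state machine over every position by first collecting the
-- indices of the 1-entries and then scanning only those with an Option run-start (objective: idiomatic).

-- ===== PORT A =====
-- one step of A's for-loop body; state = (flag, index1, index2, ones_list); indices in range,
-- so nums[i] is ported exactly by pyGetD.
def pvStepA (nums : List Int) (st : Int × Int × Int × List (List Int)) (i : Int) :
    Int × Int × Int × List (List Int) :=
  -- if (flag == 0) & (nums[i] == 1): index1 = i; index2 = i; flag = 1
  let s := if st.1 = 0 ∧ PySem.List.pyGetD nums i 0 = 1 then (1, i, i, st.2.2.2) else st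
  -- if (flag == 1) & (nums[i] == 1): index2 = i; …
  if s.1 = 1 ∧ PySem.List.pyGetD nums i 0 = 1 then
    if i + 1 = (nums.length : Int) then (0, s.2.1, i, s.2.2.2 ++ [[s.2.1, i]])
    else if i + 1 < (nums.length : Int) ∧ PySem.List.pyGetD nums (i + 1) 0 = 0 then
      (0, s.2.1, i, s.2.2.2 ++ [[s.2.1, i]])
    else (s.1, s.2.1, i, s.2.2.2)
  else s

def get_ones_index (nums : List Int) : List (List Int) :=
  ((PySem.List.pyRange 0 (nums.length : Int) 1).foldl (pvStepA nums) (0, 0, 0, [])).2.2.2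

-- ===== PORT B =====
-- one step of B's for-loop over the collected 1-indices; state = (start, res).
-- Python's short-circuit 'i+1 == len(nums) or nums[i+1] == 0' is exact here: nums[i+1] is only
-- decisive when i+1 < len(nums), where pyGetD is nums[i+1].
def pvStepB (nums : List Int) (st : Option Int × List (List Int)) (i : Int) :
    Option Int × List (List Int) :=
  let start := st.1.getD i        -- if start is None: start = i
  if i + 1 = (nums.length : Int) ∨ PySem.List.pyGetD nums (i + 1) 0 = 0 then
    (none, st.2 ++ [[start, i]])
  else (some start, st.2)

def get_ones_index_alt (nums : List Int) : List (List Int) :=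
  let ones := ((PySem.List.enumerate nums 0).filter (fun p => p.2 == 1)).map (fun p => p.1)
  (ones.foldl (pvStepB nums) (none, [])).2

-- ===== PRECONDITION & SPEC =====
def Spec_get_ones_index (nums : List Int) (out : List (List Int)) : Prop := out = get_ones_index_alt nums
instance (nums : List Int) (out : List (List Int)) : Decidable (Spec_get_ones_index nums out) := by unfold Spec_get_ones_index; infer_instance

-- ===== CLAIM (what is proved, stated in full; the proofs are below) =====
def Claim_equal_get_ones_index : Prop := ∀ (nums : List Int), Dom_get_ones_index nums → Spec_get_ones_index nums (get_ones_index nums)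

-- ===== LEMMAS AND PROOFS =====

-- enumerate as a map over List.range
lemma pv_enum_eq (nums : List Int) (s : Int) :
    PySem.List.enumerate nums s
      = (List.range nums.length).map (fun (k : Nat) => (s + (k : Int), nums.getD k 0)) := by
  induction nums generalizing s with
  | nil => simp [PySem.List.enumerate_nil]
  | cons x xs ih =>
      rw [PySem.List.enumerate_cons, ih (s + 1), List.length_cons, List.range_succ_eq_map,
        List.map_cons, List.map_map]
      refine congrArg₂ _ (by simp) ?_
      apply List.map_congr_left
      intro k _
      simp only [Function.comp_def, List.getD_cons_succ]
      refine Prod.ext ?_ rfl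
      push_cast; ring

-- the core invariant: A's fold over all indices and B's fold over the 1-indices (written as a
-- conditional fold) produce the same output list, provided flag/start correspond.
lemma pv_main (nums : List Int) :
    ∀ (b a : Nat) (flag i1 i2 : Int) (st : Option Int) (acc : List (List Int)),
      a + b = nums.length →
      ((flag = 0 ∧ st = none) ∨ (flag = 1 ∧ st = some i1)) →
      ((List.range' a b).foldl (fun s (k : Nat) => pvStepA nums s (k : Int)) (flag, i1, i2, acc)).2.2.2
        = ((List.range' a b).foldl
            (fun s (k : Nat) => if nums.getD k 0 == 1 then pvStepB nums s (k : Int) else s) (st, acc)).2 := by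
  intro b
  induction b with
  | zero => intro a flag i1 i2 st acc _ _; simp
  | succ b ih =>
      intro a flag i1 i2 st acc hlen hinv
      rw [List.range'_succ, List.foldl_cons, List.foldl_cons]
      have ha : a < nums.length := by omega
      have hget : PySem.List.pyGetD nums ((a : Nat) : Int) 0 = nums[a]?.getD 0 := by
        simp
      have hget1 : PySem.List.pyGetD nums ((a : Int) + 1) 0 = nums[a+1]?.getD 0 := by
        have h : ((a : Int) + 1) = (((a + 1 : Nat) : Nat) : Int) := by push_cast; ring
        rw [h, PySem.List.pyGetD_natCast]; rfl
      by_cases hx : nums[a]?.getD 0 = 1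
      · -- nums[a] == 1 : both machines act at index a
        by_cases hc : ((a : Int) + 1 = (nums.length : Int) ∨ nums[a+1]?.getD 0 = 0)
        · -- the run ends at a (last index, or followed by a 0)
          have hcA : ((a : Int) + 1 = (nums.length : Int)
              ∨ ((a : Int) + 1 < (nums.length : Int) ∧ nums[a+1]?.getD 0 = 0)) := by
            rcases hc with hc | hc
            · exact Or.inl hc
            · by_cases he : (a : Int) + 1 = (nums.length : Int)
              · exact Or.inl he
              · exact Or.inr ⟨by omega, hc⟩
          rcases hinv with ⟨hf, hs⟩ | ⟨hf, hs⟩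
          · subst hf; subst hs
            have hA : pvStepA nums (0, i1, i2, acc) ((a : Nat) : Int)
                = (0, (a : Int), (a : Int), acc ++ [[(a : Int), (a : Int)]]) := by
              simp only [pvStepA, hget, hget1, hx]
              rcases hcA with h | h
              · simp [h]
              · have he : ¬ ((a : Int) + 1 = (nums.length : Int)) := by omega
                simp [he, h]
            have hB : pvStepB nums ((none : Option Int), acc) ((a : Nat) : Int)
                = (none, acc ++ [[(a : Int), (a : Int)]]) := by
              simp only [pvStepB, Option.getD_none, hget1]
              rw [if_pos hc]
            rw [hA, if_pos (by simp [hx]), hB]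
            exact ih (a + 1) 0 (a : Int) (a : Int) none _ (by omega) (Or.inl ⟨rfl, rfl⟩)
          · subst hf; subst hs
            have hA : pvStepA nums (1, i1, i2, acc) ((a : Nat) : Int)
                = (0, i1, (a : Int), acc ++ [[i1, (a : Int)]]) := by
              simp only [pvStepA, hget, hget1, hx]
              rcases hcA with h | h
              · simp [h]
              · have he : ¬ ((a : Int) + 1 = (nums.length : Int)) := by omega
                simp [he, h]
            have hB : pvStepB nums (some i1, acc) ((a : Nat) : Int)
                = (none, acc ++ [[i1, (a : Int)]]) := by
              simp only [pvStepB, Option.getD_some, hget1]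
              rw [if_pos hc]
            rw [hA, if_pos (by simp [hx]), hB]
            exact ih (a + 1) 0 i1 (a : Int) none _ (by omega) (Or.inl ⟨rfl, rfl⟩)
        · -- the run continues past a
          rw [not_or] at hc
          have he : ¬ ((a : Int) + 1 = (nums.length : Int)) := hc.1
          rcases hinv with ⟨hf, hs⟩ | ⟨hf, hs⟩
          · subst hf; subst hs
            have hA : pvStepA nums (0, i1, i2, acc) ((a : Nat) : Int)
                = (1, (a : Int), (a : Int), acc) := by
              simp only [pvStepA, hget, hget1, hx]
              simp [he, hc.2]
            have hB : pvStepB nums ((none : Option Int), acc) ((a : Nat) : Int)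
                = (some (a : Int), acc) := by
              simp only [pvStepB, Option.getD_none, hget1]
              rw [if_neg (not_or.mpr hc)]
            rw [hA, if_pos (by simp [hx]), hB]
            exact ih (a + 1) 1 (a : Int) (a : Int) (some (a : Int)) _ (by omega) (Or.inr ⟨rfl, rfl⟩)
          · subst hf; subst hs
            have hA : pvStepA nums (1, i1, i2, acc) ((a : Nat) : Int)
                = (1, i1, (a : Int), acc) := by
              simp only [pvStepA, hget, hget1, hx]
              simp [he, hc.2]
            have hB : pvStepB nums (some i1, acc) ((a : Nat) : Int)
                = (some i1, acc) := by
              simp only [pvStepB, Option.getD_some, hget1]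
              rw [if_neg (not_or.mpr hc)]
            rw [hA, if_pos (by simp [hx]), hB]
            exact ih (a + 1) 1 i1 (a : Int) (some i1) _ (by omega) (Or.inr ⟨rfl, rfl⟩)
      · -- nums[a] != 1 : both machines leave the state unchanged
        have hA : pvStepA nums (flag, i1, i2, acc) ((a : Nat) : Int) = (flag, i1, i2, acc) := by
          simp [pvStepA, hget, hx]
        rw [hA, if_neg (by simp [hx])]
        exact ih (a + 1) flag i1 i2 st acc (by omega) hinv

-- B's collected 1-indices, rewritten as a conditional fold over the whole index range
lemma pv_alt_eq (nums : List Int) :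
    get_ones_index_alt nums
      = ((List.range nums.length).foldl
          (fun s (k : Nat) => if nums.getD k 0 == 1 then pvStepB nums s (k : Int) else s)
          (none, [])).2 := by
  simp only [get_ones_index_alt]
  rw [pv_enum_eq nums 0, List.filter_map, List.map_map, List.foldl_map, ← List.foldl_filter]
  simp [Function.comp_def]

theorem pv_equal (nums : List Int) : get_ones_index nums = get_ones_index_alt nums := by
  rw [pv_alt_eq]
  unfold get_ones_index
  rw [PySem.List.pyRange_zero_natCast, List.foldl_map, List.range_eq_range']
  exact pv_main nums nums.length 0 0 0 0 none [] (by omega) (Or.inl ⟨rfl, rfl⟩)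

-- ===== VERDICT (by name: the statement is the Claim_ definition above) =====
theorem get_ones_index_spec : Claim_equal_get_ones_index := by
  intro nums _
  unfold Spec_get_ones_index
  exact pv_equal nums
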